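-- pv_equiv track=rewrite | github.com/ds54e/sv-mint | plugins/dv_text_rules.py | _call_args
-- ===== SOURCE A (Python) =====
-- def _call_args(text, index):
--     depth = 1
--     start = index
--     args = []
--     i = index
--     while i < len(text):
--         ch = text[i]
--         if ch == "(":
--             depth += 1
--         elif ch == ")":
--             depth -= 1
--             if depth == 0:
--                 if start is not None:
--                     args.append(text[start:i].strip())
--                 break
--         elif ch == "," and depth == 1:
--             if start is not None:
--                 args.append(text[start:i].strip())
--                 start = i + 1
--         i += 1
--     return args
-- ===== SOURCE B (Python) =====
-- def _call_args(text, index):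
--     # Two-phase: first find the matching close paren, then split top-level commas.
--     n = len(text)
--     depth = 1
--     close = None
--     i = index
--     while i < n:
--         ch = text[i]
--         if ch == "(":
--             depth += 1
--         elif ch == ")":
--             depth -= 1
--             if depth == 0:
--                 close = i
--                 break
--         i += 1
--     end = n if close is None else close
--     args = []
--     start = index
--     depth = 1
--     for i in range(index, end):
--         ch = text[i]
--         if ch == "(":
--             depth += 1
--         elif ch == ")":
--             depth -= 1
--         elif ch == "," and depth == 1:
--             args.append(text[start:i].strip())
--             start = i + 1
--     if close is not None:
--         args.append(text[start:close].strip())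
--     return args
-- ===== Notes on version B (the rewrite author's own statement) =====
-- stated objective: alternative
-- what changed: A builds the argument list in a single stateful scan that appends pieces inline and breaks at the matching close paren; B decomposes the job into two phases: a first scan that only locates the matching close paren, then a separate top-level-comma split of the delimited region, appending the trailing piece only when a close paren exists.
import Mathlib
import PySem

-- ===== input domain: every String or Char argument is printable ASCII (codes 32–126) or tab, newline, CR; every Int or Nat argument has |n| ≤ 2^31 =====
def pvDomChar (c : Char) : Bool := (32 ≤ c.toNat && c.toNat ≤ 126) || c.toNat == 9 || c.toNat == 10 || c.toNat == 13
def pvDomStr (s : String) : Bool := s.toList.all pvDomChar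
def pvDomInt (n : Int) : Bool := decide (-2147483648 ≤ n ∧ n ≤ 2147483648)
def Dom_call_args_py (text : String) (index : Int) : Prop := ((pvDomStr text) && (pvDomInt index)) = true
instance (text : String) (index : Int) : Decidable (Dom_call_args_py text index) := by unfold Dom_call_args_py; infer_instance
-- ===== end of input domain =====

-- A single stateful scan vs B's two-phase decomposition (locate close paren, then split top-level commas); same cost, return value only.


-- ===== PORT A =====
-- text[a:b].strip(): shared by both ports (both Pythons write the same expression)
def pvPiece (cs : List Char) (a b : Int) : String :=
  String.ofList (PySem.Chars.strip (PySem.List.slice cs (some a) (some b)))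

-- A's while loop: state (depth, start, args, i); fuel bounds the remaining iterations.
def pvALoop (cs : List Char) : Nat → Int → Int → List String → Int → List String
  | 0, _, _, args, _ => args
  | fuel+1, depth, start, args, i =>
    if i < (cs.length : Int) then
      match PySem.List.pyGet? cs i with
      | none => args   -- text[i] raises IndexError: excluded by Pre_
      | some ch =>
        if ch = '(' then pvALoop cs fuel (depth + 1) start args (i + 1)
        else if ch = ')' then
          if depth - 1 = 0 then args ++ [pvPiece cs start i]
          else pvALoop cs fuel (depth - 1) start args (i + 1)
        else if ch = ',' ∧ depth = 1 then
          pvALoop cs fuel depth (i + 1) (args ++ [pvPiece cs start i]) (i + 1)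
        else pvALoop cs fuel depth start args (i + 1)
    else args

def call_args_py (text : String) (index : Int) : List String :=
  pvALoop text.toList ((text.toList.length - index).toNat) 1 index [] index

-- ===== PORT B =====
-- Phase 1: walk from i with the running depth, return the index of the matching ')' (if any).
def pvFindClose (cs : List Char) : Nat → Int → Int → Option Int
  | 0, _, _ => none
  | fuel+1, depth, i =>
    if i < (cs.length : Int) then
      match PySem.List.pyGet? cs i with
      | none => none   -- text[i] raises IndexError: excluded by Pre_
      | some ch =>
        if ch = '(' then pvFindClose cs fuel (depth + 1) (i + 1)
        else if ch = ')' then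
          if depth - 1 = 0 then some i else pvFindClose cs fuel (depth - 1) (i + 1)
        else pvFindClose cs fuel depth (i + 1)
    else none

-- Phase 2: 'for i in range(index, end)' — split at top-level commas; returns (args, start).
def pvSplit (cs : List Char) : List Int → Int → Int → List String → List String × Int
  | [], _, start, args => (args, start)
  | i :: rest, depth, start, args =>
    match PySem.List.pyGet? cs i with
    | none => (args, start)   -- unreachable under Pre_
    | some ch =>
      if ch = '(' then pvSplit cs rest (depth + 1) start args
      else if ch = ')' then pvSplit cs rest (depth - 1) start args
      else if ch = ',' ∧ depth = 1 then
        pvSplit cs rest depth (i + 1) (args ++ [pvPiece cs start i])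
      else pvSplit cs rest depth start args

def call_args_py_alt (text : String) (index : Int) : List String :=
  let cs := text.toList
  let n : Int := cs.length
  let close := pvFindClose cs ((cs.length : Int) - index).toNat 1 index
  let e : Int := match close with | none => n | some c => c
  let p := pvSplit cs (PySem.List.pyRange index e 1) 1 index []
  match close with
  | none => p.1
  | some c => p.1 ++ [pvPiece cs p.2 c]

-- ===== PRECONDITION & SPEC =====
-- Pre_ excludes exactly the inputs where A raises IndexError at text[i] (index below -len(text)).
def Pre_call_args_py (text : String) (index : Int) : Prop :=
  -(text.toList.length : Int) ≤ index
instance (text : String) (index : Int) : Decidable (Pre_call_args_py text index) := by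
  unfold Pre_call_args_py; infer_instance

def pvWitness_call_args_py : String × Int := ("a, f(x, y), b)", 0)

def Spec_call_args_py (text : String) (index : Int) (out : List String) : Prop := out = call_args_py_alt text index
instance (text : String) (index : Int) (out : List String) : Decidable (Spec_call_args_py text index out) := by unfold Spec_call_args_py; infer_instance

-- ===== CLAIM (what is proved, stated in full; the proofs are below) =====
def Claim_equal_call_args_py : Prop := ∀ (text : String) (index : Int), Dom_call_args_py text index → Pre_call_args_py text index → Spec_call_args_py text index (call_args_py text index)

-- ===== LEMMAS AND PROOFS =====

-- Proof-side view of B: assemble the result from a given close-paren search outcome.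
def pvAssemble (cs : List Char) (depth start i : Int) (args : List String) (close : Option Int) : List String :=
  match close with
  | none => (pvSplit cs (PySem.List.pyRange i (cs.length : Int) 1) depth start args).1
  | some c =>
      let p := pvSplit cs (PySem.List.pyRange i c 1) depth start args
      p.1 ++ [pvPiece cs p.2 c]

-- A found close paren lies at or beyond the scan start.
theorem pvFindClose_le (cs : List Char) :
    ∀ (fuel : Nat) (depth i c : Int), pvFindClose cs fuel depth i = some c → i ≤ c := by
  intro fuel
  induction fuel with
  | zero => intro depth i c h; simp [pvFindClose] at h
  | succ f ih =>
    intro depth i c h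
    unfold pvFindClose at h
    split at h
    · cases hg : PySem.List.pyGet? cs i with
      | none => rw [hg] at h; simp at h
      | some ch =>
        rw [hg] at h
        simp only at h
        split_ifs at h with h1 h2 h3
        · have := ih _ _ _ h; omega
        · simp at h; omega
        · have := ih _ _ _ h; omega
        · have := ih _ _ _ h; omega
    · simp at h

-- Main invariant: A's loop from any state equals B's two phases run from the same state.
theorem pvLoop_eq (cs : List Char) :
    ∀ (fuel : Nat) (depth start i : Int) (args : List String),
      -(cs.length : Int) ≤ i →
      (cs.length : Int) - i ≤ (fuel : Int) →
      pvALoop cs fuel depth start args i =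
        pvAssemble cs depth start i args (pvFindClose cs fuel depth i) := by
  intro fuel
  induction fuel with
  | zero =>
    intro depth start i args hlo hfuel
    have hge : (cs.length : Int) ≤ i := by exact_mod_cast by omega
    simp [pvALoop, pvFindClose, pvAssemble, pvSplit, PySem.List.pyRange_one_eq_nil hge]
  | succ f ih =>
    intro depth start i args hlo hfuel
    by_cases hi : i < (cs.length : Int)
    · have hstep : ∀ (d s : Int) (a : List String),
          pvALoop cs f d s a (i + 1) = pvAssemble cs d s (i + 1) a (pvFindClose cs f d (i + 1)) := by
        intro d s a; exact ih d s (i + 1) a (by omega) (by omega)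
      obtain ⟨ch, hch⟩ : ∃ ch, PySem.List.pyGet? cs i = some ch := by
        cases hg : PySem.List.pyGet? cs i with
        | none =>
          rw [PySem.List.pyGet?_eq_none_iff] at hg
          exact absurd ⟨hlo, hi⟩ hg
        | some ch => exact ⟨ch, rfl⟩
      unfold pvALoop pvFindClose
      simp only [if_pos hi, hch]
      by_cases h1 : ch = '('
      · simp only [if_pos h1]
        cases hc : pvFindClose cs f (depth + 1) (i + 1) with
        | none =>
          rw [hstep, hc]
          simp only [pvAssemble, PySem.List.pyRange_one_cons hi, pvSplit, hch, if_pos h1]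
        | some c =>
          have hic := pvFindClose_le cs f _ _ _ hc
          rw [hstep, hc]
          simp only [pvAssemble, PySem.List.pyRange_one_cons (show i < c by omega), pvSplit, hch,
            if_pos h1]
      · simp only [if_neg h1]
        by_cases h2 : ch = ')'
        · simp only [if_pos h2]
          by_cases h3 : depth - 1 = 0
          · simp only [if_pos h3]
            simp [pvAssemble, pvSplit, PySem.List.pyRange_one_eq_nil (le_refl i)]
          · simp only [if_neg h3]
            cases hc : pvFindClose cs f (depth - 1) (i + 1) with
            | none =>
              rw [hstep, hc]
              simp only [pvAssemble, PySem.List.pyRange_one_cons hi, pvSplit, hch, if_neg h1,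
                if_pos h2]
            | some c =>
              have hic := pvFindClose_le cs f _ _ _ hc
              rw [hstep, hc]
              simp only [pvAssemble, PySem.List.pyRange_one_cons (show i < c by omega), pvSplit,
                hch, if_neg h1, if_pos h2]
        · simp only [if_neg h2]
          by_cases h4 : ch = ',' ∧ depth = 1
          · simp only [if_pos h4]
            cases hc : pvFindClose cs f depth (i + 1) with
            | none =>
              rw [hstep, hc]
              simp only [pvAssemble, PySem.List.pyRange_one_cons hi, pvSplit, hch, if_neg h1,
                if_neg h2, if_pos h4]
            | some c =>
              have hic := pvFindClose_le cs f _ _ _ hc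
              rw [hstep, hc]
              simp only [pvAssemble, PySem.List.pyRange_one_cons (show i < c by omega), pvSplit,
                hch, if_neg h1, if_neg h2, if_pos h4]
          · simp only [if_neg h4]
            cases hc : pvFindClose cs f depth (i + 1) with
            | none =>
              rw [hstep, hc]
              simp only [pvAssemble, PySem.List.pyRange_one_cons hi, pvSplit, hch, if_neg h1,
                if_neg h2, if_neg h4]
            | some c =>
              have hic := pvFindClose_le cs f _ _ _ hc
              rw [hstep, hc]
              simp only [pvAssemble, PySem.List.pyRange_one_cons (show i < c by omega), pvSplit,
                hch, if_neg h1, if_neg h2, if_neg h4]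
    · have hge : (cs.length : Int) ≤ i := by omega
      unfold pvALoop pvFindClose
      simp [if_neg hi, pvAssemble, pvSplit, PySem.List.pyRange_one_eq_nil hge]

-- ===== VERDICT (by name: the statement is the Claim_ definition above) =====
theorem call_args_py_spec : Claim_equal_call_args_py := by
  intro text index _ hpre
  unfold Spec_call_args_py call_args_py call_args_py_alt
  rw [pvLoop_eq text.toList _ 1 index index [] hpre (Int.self_le_toNat _)]
  cases hc : pvFindClose text.toList ((text.toList.length : Int) - index).toNat 1 index <;>
    simp only [pvAssemble, hc]
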